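-- pv_equiv track=rewrite | github.com/Fmakdemir/Nonogram-Solver | nonogram-generator.py | count_rows
-- ===== SOURCE A (Python) =====
-- def count_rows(ar):
-- 	res = []
-- 	for row in ar:
-- 		row_res = []
-- 		cnt = 0
-- 		for v in row:
-- 			if v == True:
-- 				cnt += 1
-- 			elif cnt != 0:
-- 				row_res.append(cnt)
-- 				cnt = 0
-- 		if cnt != 0:
-- 			row_res.append(cnt)
-- 		res.append(row_res)
-- 	return res
-- ===== SOURCE B (Python) =====
-- def count_rows(ar):
--     res = []
--     for row in ar:
--         padded = [False] + list(row) + [False]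
--         pairs = list(zip(padded, padded[1:]))
--         starts = [i for i, (a, b) in enumerate(pairs) if (not a) and b]
--         ends = [i for i, (a, b) in enumerate(pairs) if a and (not b)]
--         res.append([e - s for s, e in zip(starts, ends)])
--     return res
-- ===== Notes on version B (the rewrite author's own statement) =====
-- stated objective: alternative
-- what changed: Instead of a running counter, B pads each row with False on both sides, finds the indices of False->True and True->False transitions among adjacent pairs, and obtains each run length as the difference of the paired end and start indices.
import Mathlib
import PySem

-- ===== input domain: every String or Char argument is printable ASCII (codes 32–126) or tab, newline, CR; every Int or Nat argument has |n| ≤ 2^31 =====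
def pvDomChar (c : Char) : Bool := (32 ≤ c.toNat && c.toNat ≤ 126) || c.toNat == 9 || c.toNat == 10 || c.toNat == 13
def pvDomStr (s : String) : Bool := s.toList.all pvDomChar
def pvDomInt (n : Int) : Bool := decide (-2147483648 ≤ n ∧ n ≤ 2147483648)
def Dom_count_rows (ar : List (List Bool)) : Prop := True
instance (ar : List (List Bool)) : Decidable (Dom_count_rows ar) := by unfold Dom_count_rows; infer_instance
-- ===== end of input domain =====

-- B replaces A's running counter by a transition-index algorithm: each row is padded with
-- False on both sides, the indices of False->True and True->False adjacent transitions are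
-- collected, and each run length is the difference of the paired end and start indices.

-- ===== PORT A =====
-- inner 'for v in row' loop of A, carrying row_res and cnt
def countRowLoop (row : List Bool) (row_res : List Int) (cnt : Int) : List Int :=
  match row with
  | [] => if cnt ≠ 0 then row_res ++ [cnt] else row_res
  | v :: rest =>
    if v = true then countRowLoop rest row_res (cnt + 1)
    else if cnt ≠ 0 then countRowLoop rest (row_res ++ [cnt]) 0
    else countRowLoop rest row_res cnt

def count_rows (ar : List (List Bool)) : List (List Int) :=
  ar.map (fun row => countRowLoop row [] 0)

-- ===== PORT B =====
def count_rows_alt (ar : List (List Bool)) : List (List Int) :=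
  ar.map (fun row =>
    let padded : List Bool := [false] ++ row ++ [false]
    let pairs := padded.zip (padded.drop 1)
    let starts := (PySem.List.enumerate pairs 0).filterMap
        (fun p => if (!p.2.1) && p.2.2 then some p.1 else none)
    let ends := (PySem.List.enumerate pairs 0).filterMap
        (fun p => if p.2.1 && !p.2.2 then some p.1 else none)
    List.zipWith (fun s e => e - s) starts ends)

-- ===== PRECONDITION & SPEC =====
def Spec_count_rows (ar : List (List Bool)) (out : List (List Int)) : Prop := out = count_rows_alt ar
instance (ar : List (List Bool)) (out : List (List Int)) : Decidable (Spec_count_rows ar out) := by unfold Spec_count_rows; infer_instance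

-- ===== CLAIM (what is proved, stated in full; the proofs are below) =====
def Claim_equal_count_rows : Prop := ∀ (ar : List (List Bool)), Dom_count_rows ar → Spec_count_rows ar (count_rows ar)

-- ===== LEMMAS AND PROOFS =====

-- A's inner loop with the accumulator split out
def rowF : List Bool → Int → List Int
  | [], cnt => if cnt ≠ 0 then [cnt] else []
  | true :: xs, cnt => rowF xs (cnt + 1)
  | false :: xs, cnt => (if cnt ≠ 0 then [cnt] else []) ++ rowF xs 0

theorem countRowLoop_eq_rowF (row : List Bool) :
    ∀ res cnt, countRowLoop row res cnt = res ++ rowF row cnt := by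
  induction row with
  | nil => intro res cnt; simp only [countRowLoop, rowF]; split <;> simp
  | cons v xs ih =>
    intro res cnt
    cases v with
    | true => simpa [countRowLoop, rowF] using ih res (cnt + 1)
    | false =>
      by_cases hc : cnt = 0 <;> simp [countRowLoop, rowF, hc, ih]

-- the list of adjacent pairs of (b :: ys): (prev, cur) walking ys with initial prev b
def chainP (b : Bool) : List Bool → List (Bool × Bool)
  | [] => []
  | x :: xs => (b, x) :: chainP x xs

theorem zip_tail_eq_chainP (ys : List Bool) : ∀ b, (b :: ys).zip ys = chainP b ys := by
  induction ys with
  | nil => intro b; simp [chainP]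
  | cons y t ih => intro b; simp [chainP, ← ih y]

-- start / end transition indices, enumerated from k
def Sfun (k : Int) (ps : List (Bool × Bool)) : List Int :=
  (PySem.List.enumerate ps k).filterMap (fun p => if (!p.2.1) && p.2.2 then some p.1 else none)
def Efun (k : Int) (ps : List (Bool × Bool)) : List Int :=
  (PySem.List.enumerate ps k).filterMap (fun p => if p.2.1 && !p.2.2 then some p.1 else none)

theorem Sfun_cons (k : Int) (q : Bool × Bool) (ps : List (Bool × Bool)) :
    Sfun k (q :: ps) = (if (!q.1) && q.2 then [k] else []) ++ Sfun (k + 1) ps := by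
  simp only [Sfun, PySem.List.enumerate_cons, List.filterMap_cons]
  split <;> simp_all

theorem Efun_cons (k : Int) (q : Bool × Bool) (ps : List (Bool × Bool)) :
    Efun k (q :: ps) = (if q.1 && !q.2 then [k] else []) ++ Efun (k + 1) ps := by
  simp only [Efun, PySem.List.enumerate_cons, List.filterMap_cons]
  split <;> simp_all

-- the heart of the equivalence: zipped transition-index differences = A's counter loop
theorem chain_main (xs : List Bool) : ∀ k : Int,
    (List.zipWith (fun s e => e - s) (Sfun k (chainP false (xs ++ [false])))
        (Efun k (chainP false (xs ++ [false]))) = rowF xs 0)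
    ∧ (∀ s : Int, s < k →
        List.zipWith (fun s' e => e - s')
          (s :: Sfun k (chainP true (xs ++ [false])))
          (Efun k (chainP true (xs ++ [false]))) = rowF xs (k - s)) := by
  induction xs with
  | nil =>
    intro k
    constructor
    · simp [chainP, Sfun, Efun, PySem.List.enumerate, rowF]
    · intro s hs
      have hne : k - s ≠ 0 := by omega
      simp [chainP, Sfun, Efun, PySem.List.enumerate, rowF, hne]
  | cons x t ih =>
    intro k
    constructor
    · cases x with
      | false =>
        simpa [chainP, Sfun_cons, Efun_cons, rowF] using (ih (k + 1)).1
      | true =>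
        have h := (ih (k + 1)).2 k (by omega)
        simp only [chainP, List.cons_append, Sfun_cons, Efun_cons]
        simpa [rowF, show k + 1 - k = 1 by ring] using h
    · intro s hs
      cases x with
      | true =>
        have h := (ih (k + 1)).2 s (by omega)
        simp only [chainP, List.cons_append, Sfun_cons, Efun_cons]
        simpa [rowF, show k + 1 - s = k - s + 1 by ring] using h
      | false =>
        have h := (ih (k + 1)).1
        have hne : k - s ≠ 0 := by omega
        simp only [chainP, List.cons_append, Sfun_cons, Efun_cons]
        simp [rowF, hne, h]

-- ===== VERDICT (by name: the statement is the Claim_ definition above) =====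
theorem count_rows_spec : Claim_equal_count_rows := by
  intro ar _
  unfold Spec_count_rows count_rows count_rows_alt
  apply List.map_congr_left
  intro row _
  have hz : ([false] ++ row ++ [false]).zip (([false] ++ row ++ [false]).drop 1)
      = chainP false (row ++ [false]) := by
    simpa using zip_tail_eq_chainP (row ++ [false]) false
  rw [countRowLoop_eq_rowF row [] 0]
  simp only [List.nil_append, hz]
  exact ((chain_main row 0).1).symm
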